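-- pv_equiv track=rewrite | github.com/ivekhov/hexletpy | functions/tasks_funcs/tasks_functions.py | filter_anagrams
-- ===== SOURCE A (Python) =====
-- from collections import Counter
--
-- def filter_anagrams(word, collection):
--     result = []
--     if word == '':
--         for item in collection:
--             if item == word:
--                 result.append(item)
--         return result
--
--     cnt = Counter(str(word))
--     for item in collection:
--         item_cnt = Counter(str(item))
--         flag = True
--         for k, v in cnt.items():
--             if not item_cnt.get(k) or v > item_cnt[k]:
--                 flag = False
--                 break
--         for key in item_cnt.keys():
--             if not cnt.get(key) or item_cnt[key] > cnt[key]: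
--                 flag = False
--                 break
--         if flag:
--             result.append(item)
--     return result
-- ===== SOURCE B (Python) =====
-- def filter_anagrams(word, collection):
--     target = sorted(str(word))
--     return [item for item in collection if sorted(str(item)) == target]
-- ===== Notes on version B (the rewrite author's own statement) =====
-- stated objective: simpler
-- what changed: Replaces the two-directional Counter containment check (with an empty-word special case) by a single sort-and-compare anagram test against the sorted word computed once.
import Mathlib
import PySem

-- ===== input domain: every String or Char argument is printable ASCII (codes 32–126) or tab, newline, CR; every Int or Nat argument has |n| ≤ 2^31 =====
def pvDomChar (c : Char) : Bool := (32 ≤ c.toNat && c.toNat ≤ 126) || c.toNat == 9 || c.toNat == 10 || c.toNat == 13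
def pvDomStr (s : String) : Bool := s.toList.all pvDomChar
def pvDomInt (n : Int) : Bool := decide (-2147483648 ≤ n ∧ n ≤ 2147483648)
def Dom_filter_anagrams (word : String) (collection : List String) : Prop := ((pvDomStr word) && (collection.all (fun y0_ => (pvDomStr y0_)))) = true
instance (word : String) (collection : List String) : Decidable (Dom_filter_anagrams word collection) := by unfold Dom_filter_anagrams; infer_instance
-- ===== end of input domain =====

-- B replaces A's two-directional Counter containment (with an empty-word special case)
-- by a single sort-and-compare anagram test; same results, plainer code.
-- ===== PORT A =====
def filter_anagrams (word : String) (collection : List String) : List String :=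
  if word = "" then
    collection.foldl (fun result item =>
      if item = word then result ++ [item] else result) []
  else
    let cnt := PySem.Dict.counter word.toList
    collection.foldl (fun result item =>
      let item_cnt := PySem.Dict.counter item.toList
      let flag :=
        (cnt.items.all (fun kv =>
          !(item_cnt.getD kv.1 0 == 0 || decide (kv.2 > item_cnt.getD kv.1 0)))) &&
        (item_cnt.keys.all (fun k =>
          !(cnt.getD k 0 == 0 || decide (item_cnt.getD k 0 > cnt.getD k 0))))
      if flag then result ++ [item] else result) []

-- ===== PORT B =====
def filter_anagrams_alt (word : String) (collection : List String) : List String :=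
  let target := PySem.List.sorted word.toList (fun c => c) false
  collection.filter (fun item => PySem.List.sorted item.toList (fun c => c) false == target)

-- ===== PRECONDITION & SPEC =====
def Spec_filter_anagrams (word : String) (collection : List String) (out : List String) : Prop := out = filter_anagrams_alt word collection
instance (word : String) (collection : List String) (out : List String) : Decidable (Spec_filter_anagrams word collection out) := by unfold Spec_filter_anagrams; infer_instance

-- ===== CLAIM (what is proved, stated in full; the proofs are below) =====
def Claim_equal_filter_anagrams : Prop := ∀ (word : String) (collection : List String), Dom_filter_anagrams word collection → Spec_filter_anagrams word collection (filter_anagrams word collection)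

-- ===== LEMMAS AND PROOFS =====



-- flag of A's general path holds iff the two char lists are permutations of each other
lemma flag_iff_perm (w s : List Char) :
    ((((PySem.Dict.counter w).items.all (fun kv =>
        !((PySem.Dict.counter s).getD kv.1 0 == 0 || decide (kv.2 > (PySem.Dict.counter s).getD kv.1 0)))) &&
      ((PySem.Dict.counter s).keys.all (fun k =>
        !((PySem.Dict.counter w).getD k 0 == 0 || decide ((PySem.Dict.counter s).getD k 0 > (PySem.Dict.counter w).getD k 0)))))
      = true) ↔ s.Perm w := by
  rw [List.perm_iff_count]
  simp [PySem.Dict.items_counter, PySem.Dict.keys_counter, PySem.Dict.getD_counter,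
        PySem.Set.mem_ofList, List.all_eq_true]
  constructor
  · rintro ⟨h1, h2⟩ c
    by_cases hw : c ∈ w
    · have := h1 c hw
      by_cases hs : c ∈ s
      · have := h2 c hs
        omega
      · simp [List.count_eq_zero_of_not_mem hs] at this
    · by_cases hs : c ∈ s
      · have := h2 c hs
        simp [List.count_eq_zero_of_not_mem hw] at this
      · simp [List.count_eq_zero_of_not_mem hw, List.count_eq_zero_of_not_mem hs]
  · intro h
    constructor
    · intro c hc
      have hcnt := h c
      have : 0 < w.count c := List.count_pos_iff.mpr hc
      constructor <;> omega
    · intro c hc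
      have hcnt := h c
      have : 0 < s.count c := List.count_pos_iff.mpr hc
      constructor <;> omega

-- B's per-item test holds iff the two char lists are permutations of each other
lemma sorted_test_iff_perm (w s : List Char) :
    ((PySem.List.sorted s (fun c => c) false == PySem.List.sorted w (fun c => c) false) = true)
      ↔ s.Perm w := by
  rw [beq_iff_eq, PySem.List.sorted_id_eq_sorted_id_iff_perm]

-- ===== VERDICT (by name: the statement is the Claim_ definition above) =====
theorem filter_anagrams_spec : Claim_equal_filter_anagrams := by
  intro word collection _
  unfold Spec_filter_anagrams filter_anagrams filter_anagrams_alt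
  dsimp only
  by_cases hw : word = ""
  · subst hw
    rw [if_pos rfl, PySem.List.foldl_append_ite_eq_filter]
    simp only [List.nil_append]
    apply List.filter_congr
    intro item _
    apply Bool.eq_iff_iff.mpr
    rw [decide_eq_true_eq, sorted_test_iff_perm,
        show ("" : String).toList = [] from rfl, List.perm_nil, String.toList_eq_nil_iff]
  · simp only [if_neg hw]
    rw [PySem.List.foldl_append_if_eq_filter]
    simp only [List.nil_append]
    apply List.filter_congr
    intro item _
    apply Bool.eq_iff_iff.mpr
    rw [flag_iff_perm, sorted_test_iff_perm]
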